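-- pv_equiv track=rewrite | github.com/Natanal-H/algorithm | programmers/기초/08. 조건문 활용/programmers_배열의_원소_삭제하기.py | solution
-- ===== SOURCE A (Python) =====
-- def solution(arr, delete_list):
--     arr = sorted([[i, v] for i, v in enumerate(arr)], key=lambda x: x[1] )
--     delete_list = sorted(delete_list)
--
--     i = j = 0
--
--     while i < len(arr) and j < len(delete_list):
--         if arr[i][1] == delete_list[j] :
--             arr.pop(i)
--         elif arr[i][1] > delete_list[j] :
--             j += 1
--         else :
--             i += 1
--
--     arr = sorted([a for a in arr], key=lambda x: x[0] )
--
--     return [a[1] for a in arr]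
-- ===== SOURCE B (Python) =====
-- def solution(arr, delete_list):
--     ds = set(delete_list)
--     return [x for x in arr if x not in ds]
-- ===== Notes on version B (the rewrite author's own statement) =====
-- stated objective: faster
-- what changed: Replaces A's index-pairing, double sort and two-pointer pop-merge with a single order-preserving linear filter of arr against a hash set of delete_list.
import Mathlib
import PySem

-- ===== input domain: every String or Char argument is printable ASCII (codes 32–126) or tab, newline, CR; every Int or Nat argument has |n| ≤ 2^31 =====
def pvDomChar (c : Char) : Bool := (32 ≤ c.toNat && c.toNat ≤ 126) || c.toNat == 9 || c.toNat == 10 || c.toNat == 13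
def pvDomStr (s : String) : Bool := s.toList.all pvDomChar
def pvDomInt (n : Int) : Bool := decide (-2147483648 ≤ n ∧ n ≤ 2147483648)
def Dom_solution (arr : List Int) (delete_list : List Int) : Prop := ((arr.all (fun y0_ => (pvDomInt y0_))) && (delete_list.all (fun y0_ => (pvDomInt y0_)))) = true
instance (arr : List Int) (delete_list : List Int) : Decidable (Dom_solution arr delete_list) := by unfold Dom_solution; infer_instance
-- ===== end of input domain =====

-- B replaces A's enumerate+double-sort+two-pointer pop-merge by one order-preserving linear filter against a set of delete_list (faster, measured).


-- ===== PORT A =====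
-- the while loop: i,j cursors; 'arr.pop(i)' is List.eraseIdx i (PySem.List.pop?_natCast: exact for i < len);
-- fuel = (len(arr)-i)+(len(delete_list)-j) strictly decreases each iteration, so the initial budget below never runs out
def mergeLoop : Nat → List (Int × Int) → List Int → Nat → Nat → List (Int × Int)
  | 0, a, _, _, _ => a
  | fuel + 1, a, d, i, j =>
    if h : i < a.length ∧ j < d.length then
      if a[i].2 = d[j] then mergeLoop fuel (a.eraseIdx i) d i j
      else if a[i].2 > d[j] then mergeLoop fuel a d i (j + 1)
      else mergeLoop fuel a d (i + 1) j
    else a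

def solution (arr : List Int) (delete_list : List Int) : List Int :=
  let a0 := PySem.List.sorted (PySem.List.enumerate arr) (fun p => p.2) false
  let d := PySem.List.sorted delete_list (fun x => x) false
  let a1 := mergeLoop (a0.length + d.length) a0 d 0 0
  let a2 := PySem.List.sorted a1 (fun p => p.1) false
  a2.map (fun p => p.2)

-- ===== PORT B =====
def solution_alt (arr : List Int) (delete_list : List Int) : List Int :=
  let ds : PySem.Set Int := PySem.Set.ofList delete_list
  arr.filter (fun x => !(PySem.Set.contains ds x))

-- ===== PRECONDITION & SPEC =====
def Spec_solution (arr : List Int) (delete_list : List Int) (out : List Int) : Prop := out = solution_alt arr delete_list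
instance (arr : List Int) (delete_list : List Int) (out : List Int) : Decidable (Spec_solution arr delete_list out) := by unfold Spec_solution; infer_instance

-- ===== CLAIM (what is proved, stated in full; the proofs are below) =====
def Claim_equal_solution : Prop := ∀ (arr : List Int) (delete_list : List Int), Dom_solution arr delete_list → Spec_solution arr delete_list (solution arr delete_list)

-- ===== LEMMAS AND PROOFS =====

-- clean structural form of the two-pointer merge
def merge : List (Int × Int) → List Int → List (Int × Int)
  | [], _ => []
  | p :: a, [] => p :: a
  | p :: a, x :: d =>
    if p.2 = x then merge a (x :: d)
    else if p.2 > x then merge (p :: a) d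
    else p :: merge a (x :: d)
termination_by a d => a.length + d.length

-- one-step unfoldings of merge on a double cons
theorem merge_cons_eq {p : Int × Int} {x : Int} (a : List (Int × Int)) (d : List Int)
    (h : p.2 = x) : merge (p :: a) (x :: d) = merge a (x :: d) := by
  rw [merge, if_pos h]

theorem merge_cons_gt {p : Int × Int} {x : Int} (a : List (Int × Int)) (d : List Int)
    (h1 : ¬ p.2 = x) (h2 : p.2 > x) : merge (p :: a) (x :: d) = merge (p :: a) d := by
  rw [merge, if_neg h1, if_pos h2]

theorem merge_cons_lt {p : Int × Int} {x : Int} (a : List (Int × Int)) (d : List Int)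
    (h1 : ¬ p.2 = x) (h2 : ¬ p.2 > x) : merge (p :: a) (x :: d) = p :: merge a (x :: d) := by
  rw [merge, if_neg h1, if_neg h2]

-- with enough fuel, the index loop only rewrites the part of a from index i on
theorem mergeLoop_eq_merge (d : List Int) (fuel : Nat) (a : List (Int × Int)) (i j : Nat)
    (hfuel : (a.length - i) + (d.length - j) ≤ fuel) :
    mergeLoop fuel a d i j = a.take i ++ merge (a.drop i) (d.drop j) := by
  induction fuel generalizing a i j with
  | zero =>
    have hi : a.length ≤ i := by omega
    rw [mergeLoop, List.drop_eq_nil_of_le hi, List.take_of_length_le hi]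
    cases d.drop j <;> simp [merge]
  | succ fuel ih =>
    rw [mergeLoop]
    split
    case isTrue h =>
      by_cases heq : a[i].2 = d[j]
      · rw [if_pos heq]
        have hlen : (a.take i).length = i := by simp [List.length_take]; omega
        rw [ih _ _ _ (by have := List.length_eraseIdx_of_lt h.1; omega)]
        rw [List.eraseIdx_eq_take_drop_succ, List.take_left' hlen, List.drop_left' hlen]
        rw [List.drop_eq_getElem_cons h.1, List.drop_eq_getElem_cons h.2,
            merge_cons_eq _ _ heq, ← List.drop_eq_getElem_cons h.2]
      · rw [if_neg heq]
        by_cases hgt : a[i].2 > d[j]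
        · rw [if_pos hgt, ih _ _ _ (by omega)]
          rw [List.drop_eq_getElem_cons h.1, List.drop_eq_getElem_cons h.2,
              merge_cons_gt _ _ heq hgt, ← List.drop_eq_getElem_cons h.1]
        · rw [if_neg hgt, ih _ _ _ (by omega)]
          rw [List.drop_eq_getElem_cons h.1, List.drop_eq_getElem_cons h.2,
              merge_cons_lt _ _ heq hgt, ← List.drop_eq_getElem_cons h.2]
          have htake : List.take (i + 1) a = List.take i a ++ [a[i]] := by
            rw [List.take_add_one, List.getElem?_eq_getElem h.1]
            rfl
          rw [htake, List.append_assoc]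
          rfl
    case isFalse h =>
      rcases Nat.lt_or_ge i a.length with hi | hi
      · have hj : d.length ≤ j := by omega
        rw [List.drop_eq_nil_of_le hj]
        cases hdp : a.drop i with
        | nil =>
          have := congrArg List.length hdp
          simp at this; omega
        | cons p t => rw [merge, ← hdp, List.take_append_drop]
      · rw [List.drop_eq_nil_of_le hi, List.take_of_length_le hi]
        cases d.drop j <;> simp [merge]

-- on value-sorted inputs the merge is exactly a filter
theorem merge_eq_filter (a : List (Int × Int)) (d : List Int)
    (ha : a.Pairwise (fun p q => p.2 ≤ q.2)) (hd : d.Pairwise (· ≤ ·)) :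
    merge a d = a.filter (fun p => decide (p.2 ∉ d)) := by
  induction a, d using merge.induct with
  | case1 d => simp [merge]
  | case2 p a => simp [merge]
  | case3 p a d ih =>
    rw [merge, if_pos rfl, ih (List.Pairwise.sublist (List.sublist_cons_self p a) ha) hd]
    rw [List.filter_cons]
    simp
  | case4 p a x d h1 h2 ih =>
    rw [merge, if_neg h1, if_pos h2,
        ih ha (List.Pairwise.sublist (List.sublist_cons_self x d) hd)]
    apply List.filter_congr
    intro q hq
    have hpq : p.2 ≤ q.2 := by
      rcases List.mem_cons.1 hq with hq | hq
      · exact le_of_eq (by rw [hq])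
      · exact (List.pairwise_cons.1 ha).1 q hq
    have hne : q.2 ≠ x := by omega
    simp [hne]
  | case5 p a x d h1 h2 ih =>
    rw [merge, if_neg h1, if_neg h2,
        ih (List.Pairwise.sublist (List.sublist_cons_self p a) ha) hd]
    rw [List.filter_cons]
    have hx : ∀ y ∈ d, x ≤ y := (List.pairwise_cons.1 hd).1
    have hnm : p.2 ∉ x :: d := by
      intro hm
      rcases List.mem_cons.1 hm with hm | hm
      · omega
      · have := hx _ hm; omega
    simp [hnm]

-- pushing a snd-only filter through enumerate
theorem map_snd_filter_enumerate (arr : List Int) (s : Int) (q : Int → Bool) :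
    ((PySem.List.enumerate arr s).filter (fun p => q p.2)).map (fun p => p.2)
      = arr.filter q := by
  induction arr generalizing s with
  | nil => simp [PySem.List.enumerate_nil]
  | cons x t ih =>
    rw [PySem.List.enumerate_cons, List.filter_cons, List.filter_cons]
    by_cases hq : q x
    · simp [hq, ih]
    · simp [hq, ih]

-- ===== VERDICT (by name: the statement is the Claim_ definition above) =====
theorem solution_spec : Claim_equal_solution := by
  intro arr delete_list _
  show _ = _
  unfold solution solution_alt
  simp only []
  rw [mergeLoop_eq_merge _ _ _ _ _ (by simp)]
  simp only [List.take_zero, List.drop_zero, List.nil_append]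
  rw [merge_eq_filter _ _
      (PySem.List.sorted_pairwise (PySem.List.enumerate arr 0) (fun p => p.2))
      (PySem.List.sorted_pairwise delete_list (fun x => x))]
  rw [List.filter_congr (l := PySem.List.sorted (PySem.List.enumerate arr 0) (fun p => p.2) false)
      (q := fun p => decide (p.2 ∉ delete_list))
      (fun p _ => by simp [PySem.List.mem_sorted])]
  have hperm : ((PySem.List.enumerate arr 0).filter
      (fun p => decide (p.2 ∉ delete_list))).Perm
      ((PySem.List.sorted (PySem.List.enumerate arr 0) (fun p => p.2) false).filter
        (fun p => decide (p.2 ∉ delete_list))) :=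
    (List.Perm.filter _
      (PySem.List.sorted_perm (PySem.List.enumerate arr 0) (fun p => p.2) false)).symm
  have hpw : ((PySem.List.enumerate arr 0).filter
      (fun p => decide (p.2 ∉ delete_list))).Pairwise (fun p q => p.1 < q.1) :=
    List.Pairwise.filter _ (PySem.List.pairwise_lt_enumerate arr 0)
  rw [PySem.List.sorted_eq_of_perm_of_pairwise_lt _ _ _ hperm hpw]
  rw [map_snd_filter_enumerate arr 0 (fun x => decide (x ∉ delete_list))]
  exact (List.filter_congr (fun x _ => by
    by_cases h : x ∈ delete_list <;>
      simp [h, PySem.Set.contains_eq_listContains, PySem.Set.mem_ofList])).symm
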